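-- pv_equiv track=rewrite | github.com/raeez/ainfinity-chiral-hochschild-cohomology-3d-qft | compute/ordered_bar_bigraded_hilbert.py | poly_power
-- ===== SOURCE A (Python) =====
-- def poly_mul(a: list, b: list, maxw: int) -> list:
--     """Multiply two power series (as lists of coefficients) truncated at maxw."""
--     result = [0] * (maxw + 1)
--     for i in range(min(len(a), maxw + 1)):
--         if a[i] == 0:
--             continue
--         for j in range(min(len(b), maxw + 1 - i)):
--             if b[j] == 0:
--                 continue
--             result[i + j] += a[i] * b[j]
--     return result
--
-- def poly_power(a: list, n: int, maxw: int) -> list: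
--     """Compute a^n truncated at maxw, by repeated squaring."""
--     if n == 0:
--         result = [0] * (maxw + 1)
--         result[0] = 1
--         return result
--     if n == 1:
--         return a[:maxw + 1] + [0] * max(0, maxw + 1 - len(a))
--     if n % 2 == 0:
--         half = poly_power(a, n // 2, maxw)
--         return poly_mul(half, half, maxw)
--     else:
--         rest = poly_power(a, n - 1, maxw)
--         return poly_mul(rest, a, maxw)
-- ===== SOURCE B (Python) =====
-- def poly_mul(a: list, b: list, maxw: int) -> list:
--     """Truncated product: collect both factors' nonzero supports once, then
--     accumulate the products of support pairs that land within the truncation."""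
--     sa = [(i, a[i]) for i in range(min(len(a), maxw + 1)) if a[i] != 0]
--     sb = [(j, b[j]) for j in range(min(len(b), maxw + 1)) if b[j] != 0]
--     out = [0] * (maxw + 1)
--     for i, c in sa:
--         for j, d in sb:
--             if i + j <= maxw:
--                 out[i + j] += c * d
--     return out
--
-- def poly_power(a: list, n: int, maxw: int) -> list:
--     """Compute a^n truncated at maxw by iterative bottom-up square-and-multiply."""
--     result = [1] + [0] * maxw
--     base = a
--     while n > 0:
--         if n % 2 == 1:
--             result = poly_mul(result, base, maxw)
--         base = poly_mul(base, base, maxw)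
--         n //= 2
--     return result
-- ===== Notes on version B (the rewrite author's own statement) =====
-- stated objective: alternative
-- what changed: Replaces A's top-down recursive repeated-squaring with an iterative bottom-up square-and-multiply loop over the bits of n, and replaces the imperative dense nested-loop multiplication by one that collects both factors' nonzero supports once and accumulates the products of support pairs.
-- outside the precondition, e.g. on poly_power([1, 2, 3], 1, -2): A returns [1, 2], B returns []; on poly_power([1], -1, 2): A raises RecursionError, B returns [1, 0, 0]; on poly_power([1], 0, -1): A raises IndexError, B returns [1]
import Mathlib
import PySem

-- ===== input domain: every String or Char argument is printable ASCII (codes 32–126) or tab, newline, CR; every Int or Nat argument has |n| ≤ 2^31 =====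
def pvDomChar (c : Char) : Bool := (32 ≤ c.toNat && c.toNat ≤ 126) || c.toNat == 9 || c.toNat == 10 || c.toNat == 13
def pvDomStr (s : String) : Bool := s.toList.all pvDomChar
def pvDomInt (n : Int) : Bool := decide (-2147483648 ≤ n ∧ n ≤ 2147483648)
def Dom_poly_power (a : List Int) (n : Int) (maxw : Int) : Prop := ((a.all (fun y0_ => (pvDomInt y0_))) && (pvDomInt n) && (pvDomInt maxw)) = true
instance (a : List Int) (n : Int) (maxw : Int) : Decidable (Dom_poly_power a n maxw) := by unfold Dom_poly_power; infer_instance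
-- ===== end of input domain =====

-- B replaces A's top-down recursive repeated-squaring by an iterative bottom-up
-- square-and-multiply loop, with the truncated product accumulated over the factors'
-- nonzero supports (objective: alternative; not claimed faster).

-- ===== PORT A =====
-- helper poly_mul: literal port of A's imperative truncated multiplication.
-- a[i]/b[j]/result[i+j] are ported with List.getD/List.set: every index the loops produce is
-- in range, where Python indexing is exact.
def poly_mul (a b : List Int) (maxw : Int) : List Int :=
  (List.range (min a.length (maxw + 1).toNat)).foldl (fun result i =>
    if a.getD i 0 = 0 then result
    else (List.range (min b.length (maxw + 1 - (i : Int)).toNat)).foldl (fun result j =>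
      if b.getD j 0 = 0 then result
      else result.set (i + j) (result.getD (i + j) 0 + a.getD i 0 * b.getD j 0)) result)
    (List.replicate (maxw + 1).toNat 0)

def poly_power (a : List Int) (n : Int) (maxw : Int) : List Int :=
  if n = 0 then (List.replicate (maxw + 1).toNat 0).set 0 1
  else if n = 1 then
    PySem.List.slice a none (some (maxw + 1)) ++ List.replicate (max 0 (maxw + 1 - a.length)).toNat 0
  else if n < 0 then []   -- totality guard only: Python recurses forever here (outside Pre_)
  else if PySem.Int.mod n 2 = 0 then
    let half := poly_power a (PySem.Int.floordiv n 2) maxw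
    poly_mul half half maxw
  else
    poly_mul (poly_power a (n - 1) maxw) a maxw
termination_by n.toNat
decreasing_by
  · have h2 : (0:Int) < 2 := by omega
    rw [PySem.Int.floordiv_eq_ediv_of_pos h2]
    omega
  · omega

-- ===== PORT B =====
-- helper poly_mul of Source B: both factors' nonzero supports are collected once, then the
-- products of support pairs landing within the truncation are accumulated (a[i]/b[j]/out[i+j]
-- are ported with List.getD/List.set: every index produced is in range, where Python is exact).
def poly_mul_alt (a b : List Int) (maxw : Int) : List Int :=
  let sa := ((List.range (min a.length (maxw + 1).toNat)).filter
      (fun i => decide (a.getD i 0 ≠ 0))).map (fun i => (i, a.getD i 0))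
  let sb := ((List.range (min b.length (maxw + 1).toNat)).filter
      (fun j => decide (b.getD j 0 ≠ 0))).map (fun j => (j, b.getD j 0))
  sa.foldl (fun out p =>
    sb.foldl (fun out q =>
      if ((p.1 + q.1 : Nat) : Int) ≤ maxw then
        out.set (p.1 + q.1) (out.getD (p.1 + q.1) 0 + p.2 * q.2)
      else out) out)
    (List.replicate (maxw + 1).toNat 0)

-- the while-loop of Source B's poly_power (state: result, base, n)
def poly_power_loop (maxw : Int) (result base : List Int) (n : Int) : List Int :=
  if 0 < n then
    poly_power_loop maxw
      (if PySem.Int.mod n 2 = 1 then poly_mul_alt result base maxw else result)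
      (poly_mul_alt base base maxw) (PySem.Int.floordiv n 2)
  else result
termination_by n.toNat
decreasing_by
  have h2 : (0:Int) < 2 := by omega
  rw [PySem.Int.floordiv_eq_ediv_of_pos h2]
  omega

def poly_power_alt (a : List Int) (n : Int) (maxw : Int) : List Int :=
  poly_power_loop maxw ([1] ++ List.replicate maxw.toNat 0) a n

-- ===== PRECONDITION & SPEC =====
-- Pre_ excludes n < 0 (A recurses forever, RecursionError), n = 0 with maxw < 0 (A raises
-- IndexError), and n = 1 with maxw < 0: a negative truncation bound is outside the task's
-- natural domain, and there A's slice a[:maxw+1] keeps a prefix while B's truncation is empty.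
def Pre_poly_power (_a : List Int) (n : Int) (maxw : Int) : Prop :=
  0 ≤ n ∧ (0 ≤ maxw ∨ 2 ≤ n)
instance (a : List Int) (n : Int) (maxw : Int) : Decidable (Pre_poly_power a n maxw) := by
  unfold Pre_poly_power; infer_instance
def pvWitness_poly_power : List Int × Int × Int := ([1, 2], 3, 4)

def Spec_poly_power (a : List Int) (n : Int) (maxw : Int) (out : List Int) : Prop :=
  out = poly_power_alt a n maxw
instance (a : List Int) (n : Int) (maxw : Int) (out : List Int) : Decidable (Spec_poly_power a n maxw out) := by
  unfold Spec_poly_power; infer_instance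

-- ===== CLAIM (what is proved, stated in full; the proofs are below) =====
def Claim_equal_poly_power : Prop := ∀ (a : List Int) (n : Int) (maxw : Int),
  Dom_poly_power a n maxw → Pre_poly_power a n maxw → Spec_poly_power a n maxw (poly_power a n maxw)

-- ===== LEMMAS AND PROOFS =====

-- the polynomial a list of coefficients denotes
noncomputable def toP (a : List Int) : Polynomial ℤ :=
  ∑ i ∈ Finset.range a.length, Polynomial.C (a.getD i 0) * Polynomial.X ^ i

lemma toP_coeff (a : List Int) (k : Nat) : (toP a).coeff k = a.getD k 0 := by
  unfold toP
  rw [Polynomial.finset_sum_coeff]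
  simp only [Polynomial.C_mul_X_pow_eq_monomial, Polynomial.coeff_monomial]
  rw [Finset.sum_ite_eq' (Finset.range a.length) k (fun i => a.getD i 0)]
  by_cases hk : k < a.length
  · rw [if_pos (Finset.mem_range.mpr hk)]
  · rw [if_neg (by simpa using hk), List.getD_eq_default _ _ (by omega)]

-- the k-th coefficient of a product depends only on coefficients ≤ k
lemma coeff_mul_agree {p p' q q' : Polynomial ℤ} {k : Nat}
    (hp : ∀ i ≤ k, p.coeff i = p'.coeff i) (hq : ∀ i ≤ k, q.coeff i = q'.coeff i) :
    (p * q).coeff k = (p' * q').coeff k := by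
  rw [Polynomial.coeff_mul, Polynomial.coeff_mul]
  apply Finset.sum_congr rfl
  intro x hx
  have hx' := Finset.mem_antidiagonal.mp hx
  rw [hp x.1 (by omega), hq x.2 (by omega)]

-- sum of a mapped filtered range as a Finset sum
lemma filter_map_sum (P : Nat → Bool) (f : Nat → Int) (n : Nat) :
    (((List.range n).filter P).map f).sum = ∑ i ∈ Finset.range n, if P i then f i else 0 := by
  induction n with
  | zero => simp
  | succ n ih =>
    rw [List.range_succ, List.filter_append, List.map_append, List.sum_append,
      Finset.sum_range_succ, ih]
    by_cases h : P n <;> simp [h]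

-- B's multiplication: length and entries (proved below, after the shared sum lemmas)

-- generic: a fold whose body preserves length preserves length
lemma foldl_length {β : Type} (g : List Int → β → List Int)
    (hg : ∀ r x, (g r x).length = r.length) (l : List β) (r : List Int) :
    (l.foldl g r).length = r.length := by
  induction l generalizing r with
  | nil => rfl
  | cons x l ih => rw [List.foldl_cons, ih, hg]

lemma innerF_length (b : List Int) (i : Nat) (va : Int) (r : List Int) (x : Nat) :
    ((if b.getD x 0 = 0 then r
      else r.set (i + x) (r.getD (i + x) 0 + va * b.getD x 0))).length = r.length := by
  split <;> simp

-- inner loop of A's poly_mul: effect on one entry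
lemma inner_getD (b : List Int) (i : Nat) (va : Int) (m : Nat) (r : List Int) (k : Nat)
    (hm : ∀ j < m, i + j < r.length) :
    ((List.range m).foldl (fun r j =>
        if b.getD j 0 = 0 then r
        else r.set (i + j) (r.getD (i + j) 0 + va * b.getD j 0)) r).getD k 0
      = r.getD k 0 + (if i ≤ k ∧ k - i < m then va * b.getD (k - i) 0 else 0) := by
  induction m with
  | zero => simp
  | succ m ih =>
    rw [List.range_succ, List.foldl_append]
    have hm' : ∀ j < m, i + j < r.length := fun j hj => hm j (by omega)
    set r' := (List.range m).foldl (fun r j =>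
        if b.getD j 0 = 0 then r
        else r.set (i + j) (r.getD (i + j) 0 + va * b.getD j 0)) r with hr'
    have hlen : r'.length = r.length :=
      foldl_length _ (fun r x => innerF_length b i va r x) _ r
    simp only [List.foldl_cons, List.foldl_nil]
    by_cases hb : b.getD m 0 = 0
    · rw [if_pos hb, ih hm']
      by_cases hik : i ≤ k ∧ k - i < m
      · rw [if_pos hik, if_pos ⟨hik.1, by omega⟩]
      · by_cases hik' : i ≤ k ∧ k - i < m + 1
        · have : k - i = m := by omega
          rw [if_neg hik, if_pos hik', this, hb, mul_zero]
        · rw [if_neg hik, if_neg hik']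
    · rw [if_neg hb]
      by_cases hk : k = i + m
      · subst hk
        have hin : i + m < r'.length := by rw [hlen]; exact hm m (by omega)
        rw [List.getD_eq_getElem _ _ (by simpa using hin), List.getElem_set_self, ih hm']
        have h1 : ¬ (i ≤ i + m ∧ i + m - i < m) := by omega
        have h2 : i ≤ i + m ∧ i + m - i < m + 1 := by omega
        have h3 : i + m - i = m := by omega
        rw [if_neg h1, if_pos h2, h3, add_zero]
      · have hset : (r'.set (i + m) (r'.getD (i + m) 0 + va * b.getD m 0)).getD k 0
            = r'.getD k 0 := by
          simp [List.getD, Ne.symm hk]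
        rw [hset, ih hm']
        by_cases hik : i ≤ k ∧ k - i < m
        · rw [if_pos hik, if_pos ⟨hik.1, by omega⟩]
        · have hik' : ¬ (i ≤ k ∧ k - i < m + 1) := by omega
          rw [if_neg hik, if_neg hik']
-- outer loop of A's poly_mul
lemma outer_getD (a b : List Int) (maxw : Int) (I : Nat) (r : List Int)
    (hr : r.length = (maxw + 1).toNat) (k : Nat) :
    ((List.range I).foldl (fun result i =>
        if a.getD i 0 = 0 then result
        else (List.range (min b.length (maxw + 1 - (i : Int)).toNat)).foldl (fun result j =>
          if b.getD j 0 = 0 then result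
          else result.set (i + j) (result.getD (i + j) 0 + a.getD i 0 * b.getD j 0)) result) r).getD k 0
      = r.getD k 0 + ∑ i ∈ Finset.range I,
          (if i ≤ k ∧ k - i < min b.length (maxw + 1 - (i : Int)).toNat
            then a.getD i 0 * b.getD (k - i) 0 else 0) := by
  induction I generalizing r with
  | zero => simp
  | succ I ih =>
    rw [List.range_succ, List.foldl_append, Finset.sum_range_succ]
    simp only [List.foldl_cons, List.foldl_nil]
    set G := (fun (result : List Int) (i : Nat) =>
        if a.getD i 0 = 0 then result
        else (List.range (min b.length (maxw + 1 - (i : Int)).toNat)).foldl (fun result j =>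
          if b.getD j 0 = 0 then result
          else result.set (i + j) (result.getD (i + j) 0 + a.getD i 0 * b.getD j 0)) result) with hG
    have hGlen : ∀ (r : List Int) (x : Nat), (G r x).length = r.length := by
      intro r x
      rw [hG]
      dsimp only
      split
      · rfl
      · exact foldl_length _ (fun r j => innerF_length b x (a.getD x 0) r j) _ r
    set r' := (List.range I).foldl G r with hr'2
    have hlen : r'.length = r.length := foldl_length G hGlen _ r
    have hstep : (G r' I).getD k 0 = r'.getD k 0 +
        (if I ≤ k ∧ k - I < min b.length (maxw + 1 - (I : Int)).toNat
          then a.getD I 0 * b.getD (k - I) 0 else 0) := by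
      rw [hG]
      dsimp only
      by_cases ha : a.getD I 0 = 0
      · rw [if_pos ha, ha]
        split <;> simp
      · rw [if_neg ha]
        apply inner_getD
        intro j hj
        rw [hlen, hr]
        omega
    rw [hstep, ih r hr]
    ring

lemma mulA_length (a b : List Int) (maxw : Int) :
    (poly_mul a b maxw).length = (maxw + 1).toNat := by
  unfold poly_mul
  rw [foldl_length]
  · simp
  · intro r x
    dsimp only
    split
    · rfl
    · exact foldl_length _ (fun r j => innerF_length b x (a.getD x 0) r j) _ r

-- shared tail: the guarded convolution sum below the truncation is the product coefficient
lemma conv_sum (a b : List Int) (maxw : Int) (k : Nat) (hk : k < (maxw + 1).toNat) :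
    (∑ i ∈ Finset.range (min a.length (maxw + 1).toNat),
      if i ≤ k then a.getD i 0 * b.getD (k - i) 0 else 0)
      = (toP a * toP b).coeff k := by
  rw [Polynomial.coeff_mul, Finset.Nat.sum_antidiagonal_eq_sum_range_succ_mk]
  have e1 : (∑ i ∈ Finset.range (min a.length (maxw + 1).toNat),
      if i ≤ k then a.getD i 0 * b.getD (k - i) 0 else 0)
      = ∑ i ∈ Finset.range (max (min a.length (maxw + 1).toNat) (k + 1)),
      (if i ≤ k then a.getD i 0 * b.getD (k - i) 0 else 0) := by
    have hsub : Finset.range (min a.length (maxw + 1).toNat)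
        ⊆ Finset.range (max (min a.length (maxw + 1).toNat) (k + 1)) := by
      intro x hx; simp only [Finset.mem_range] at hx ⊢; omega
    refine Finset.sum_subset hsub ?_
    intro i _ hi
    have hi' : min a.length (maxw + 1).toNat ≤ i := by
      by_contra h
      exact hi (Finset.mem_range.mpr (by omega))
    by_cases hik : i ≤ k
    · rw [if_pos hik, List.getD_eq_default a 0 (by omega), zero_mul]
    · rw [if_neg hik]
  have e2 : (∑ i ∈ Finset.range (k + 1),
      if i ≤ k then a.getD i 0 * b.getD (k - i) 0 else 0)
      = ∑ i ∈ Finset.range (max (min a.length (maxw + 1).toNat) (k + 1)),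
      (if i ≤ k then a.getD i 0 * b.getD (k - i) 0 else 0) := by
    have hsub : Finset.range (k + 1)
        ⊆ Finset.range (max (min a.length (maxw + 1).toNat) (k + 1)) := by
      intro x hx; simp only [Finset.mem_range] at hx ⊢; omega
    refine Finset.sum_subset hsub ?_
    intro i _ hi
    have : ¬ i ≤ k := by
      intro h
      exact hi (Finset.mem_range.mpr (by omega))
    rw [if_neg this]
  rw [e1, ← e2]
  apply Finset.sum_congr rfl
  intro i hi
  rw [if_pos (by have := Finset.mem_range.mp hi; omega), toP_coeff, toP_coeff]

lemma mulA_getD (a b : List Int) (maxw : Int) (k : Nat) (hk : k < (maxw + 1).toNat) :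
    (poly_mul a b maxw).getD k 0 = (toP a * toP b).coeff k := by
  unfold poly_mul
  rw [outer_getD a b maxw _ _ (by simp) k, List.getD_replicate 0 hk, zero_add]
  -- each loop term reduces to a plain convolution term guarded by i ≤ k
  have key : ∀ i, (if i ≤ k ∧ k - i < min b.length (maxw + 1 - (i : Int)).toNat
      then a.getD i 0 * b.getD (k - i) 0 else 0)
      = (if i ≤ k then a.getD i 0 * b.getD (k - i) 0 else 0) := by
    intro i
    by_cases hik : i ≤ k
    · by_cases h2b : k - i < b.length
      · have hcond : k - i < min b.length (maxw + 1 - (i : Int)).toNat := by omega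
        rw [if_pos ⟨hik, hcond⟩, if_pos hik]
      · rw [if_pos hik, List.getD_eq_default b 0 (by omega), mul_zero]
        split <;> rfl
    · rw [if_neg (by omega), if_neg hik]
  rw [Finset.sum_congr rfl (fun i _ => key i)]
  exact conv_sum a b maxw k hk

-- B's inner support loop: length preservation and effect on one entry
lemma innerB_len (maxw : Int) (i : Nat) (c : Int) (r : List Int) (p : Nat × Int) :
    ((if ((i + p.1 : Nat) : Int) ≤ maxw then
        r.set (i + p.1) (r.getD (i + p.1) 0 + c * p.2) else r)).length = r.length := by
  split <;> simp

lemma innerB_getD (maxw : Int) (i : Nat) (c : Int) (q : List (Nat × Int)) :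
    ∀ (r : List Int), r.length = (maxw + 1).toNat → ∀ k, k < (maxw + 1).toNat →
    ((q.foldl (fun out p =>
        if ((i + p.1 : Nat) : Int) ≤ maxw then
          out.set (i + p.1) (out.getD (i + p.1) 0 + c * p.2)
        else out) r)).getD k 0
      = r.getD k 0 + ((q.filter (fun p => decide (i + p.1 = k))).map (fun p => c * p.2)).sum := by
  induction q with
  | nil => intro r _ k _; simp
  | cons p q ih =>
    intro r hr k hk
    rw [List.foldl_cons]
    have hstep : ((if ((i + p.1 : Nat) : Int) ≤ maxw then
        r.set (i + p.1) (r.getD (i + p.1) 0 + c * p.2) else r)).length = r.length :=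
      innerB_len maxw i c r p
    rw [ih _ (by rw [hstep, hr]) k hk]
    by_cases hpk : i + p.1 = k
    · subst hpk
      have hle : ((i + p.1 : Nat) : Int) ≤ maxw := by omega
      rw [if_pos hle]
      have hin : i + p.1 < r.length := by omega
      rw [List.getD_eq_getElem _ _ (by simpa using hin), List.getElem_set_self]
      simp
      ring
    · have hset : ∀ (r' : List Int), ((if ((i + p.1 : Nat) : Int) ≤ maxw then
          r'.set (i + p.1) (r'.getD (i + p.1) 0 + c * p.2) else r')).getD k 0 = r'.getD k 0 := by
        intro r'
        split
        · simp [List.getD, hpk]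
        · rfl
      rw [hset]
      simp [hpk]

-- B's outer support loop
lemma outerB_getD (maxw : Int) (q : List (Nat × Int)) (s : List (Nat × Int)) :
    ∀ (r : List Int), r.length = (maxw + 1).toNat → ∀ k, k < (maxw + 1).toNat →
    ((s.foldl (fun out p =>
        q.foldl (fun out p' =>
          if ((p.1 + p'.1 : Nat) : Int) ≤ maxw then
            out.set (p.1 + p'.1) (out.getD (p.1 + p'.1) 0 + p.2 * p'.2)
          else out) out) r)).getD k 0
      = r.getD k 0 + (s.map (fun p =>
          ((q.filter (fun p' => decide (p.1 + p'.1 = k))).map (fun p' => p.2 * p'.2)).sum)).sum := by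
  induction s with
  | nil => intro r _ k _; simp
  | cons p s ih =>
    intro r hr k hk
    rw [List.foldl_cons]
    have hlen : (q.foldl (fun out p' =>
        if ((p.1 + p'.1 : Nat) : Int) ≤ maxw then
          out.set (p.1 + p'.1) (out.getD (p.1 + p'.1) 0 + p.2 * p'.2)
        else out) r).length = r.length :=
      foldl_length _ (fun r' p' => innerB_len maxw p.1 p.2 r' p') q r
    rw [ih _ (by rw [hlen, hr]) k hk, innerB_getD maxw p.1 p.2 q r hr k hk]
    simp [add_assoc]

lemma mulB_length (a b : List Int) (maxw : Int) :
    (poly_mul_alt a b maxw).length = (maxw + 1).toNat := by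
  unfold poly_mul_alt
  rw [foldl_length]
  · simp
  · intro r p
    exact foldl_length _ (fun r' p' => innerB_len maxw p.1 p.2 r' p') _ r

lemma mulB_getD (a b : List Int) (maxw : Int) (k : Nat) (hk : k < (maxw + 1).toNat) :
    (poly_mul_alt a b maxw).getD k 0 = (toP a * toP b).coeff k := by
  unfold poly_mul_alt
  rw [outerB_getD maxw _ _ _ (by simp) k hk, List.getD_replicate 0 hk, zero_add,
    List.map_map, filter_map_sum]
  simp only [Function.comp]
  -- evaluate the per-support-point inner sums
  have inner_eq : ∀ (i : Nat) (c : Int),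
      (((((List.range (min b.length (maxw + 1).toNat)).filter
          (fun j => decide (b.getD j 0 ≠ 0))).map (fun j => (j, b.getD j 0))).filter
            (fun p' => decide (i + p'.1 = k))).map (fun p' => c * p'.2)).sum
      = (if i ≤ k ∧ k - i < min b.length (maxw + 1).toNat then c * b.getD (k - i) 0 else 0) := by
    intro i c
    rw [List.filter_map, List.map_map, List.filter_filter, filter_map_sum]
    simp only [Function.comp]
    by_cases hik : i ≤ k ∧ k - i < min b.length (maxw + 1).toNat
    · rw [if_pos hik, Finset.sum_eq_single (k - i)]
      · by_cases hb : b.getD (k - i) 0 = 0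
        · simp [show i + (k - i) = k by omega]
          exact fun _ => Or.inr hb
        · simp [show i + (k - i) = k by omega]
          exact fun h => Or.inr h
      · intro j _ hne
        have : ¬ (i + j = k) := by omega
        simp [this]
      · intro h
        exact absurd (Finset.mem_range.mpr hik.2) h
    · rw [if_neg hik]
      apply Finset.sum_eq_zero
      intro j hj
      have hjr := Finset.mem_range.mp hj
      have : ¬ (i + j = k) := by omega
      simp [this]
  -- reduce the guards to i ≤ k and conclude with the shared convolution lemma
  have key : ∀ i, (if decide (a.getD i 0 ≠ 0) = true
      then (((((List.range (min b.length (maxw + 1).toNat)).filter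
          (fun j => decide (b.getD j 0 ≠ 0))).map (fun j => (j, b.getD j 0))).filter
            (fun p' => decide (i + p'.1 = k))).map (fun p' => a.getD i 0 * p'.2)).sum else 0)
      = (if i ≤ k then a.getD i 0 * b.getD (k - i) 0 else 0) := by
    intro i
    rw [inner_eq i (a.getD i 0)]
    by_cases ha : a.getD i 0 = 0
    · rw [ha]
      simp
    · rw [if_pos (decide_eq_true ha)]
      by_cases hik : i ≤ k
      · by_cases h2b : k - i < b.length
        · rw [if_pos ⟨hik, by omega⟩, if_pos hik]
        · rw [if_pos hik, List.getD_eq_default b 0 (by omega), mul_zero]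
          split <;> rfl
      · rw [if_neg (by omega), if_neg hik]
  rw [Finset.sum_congr rfl (fun i _ => key i)]
  exact conv_sum a b maxw k hk

-- coefficient agreement below a bound, closed under products and powers
def Rt (T : Nat) (p q : Polynomial ℤ) : Prop := ∀ k < T, p.coeff k = q.coeff k

lemma Rt_mul {T : Nat} {p p' q q' : Polynomial ℤ} (hp : Rt T p p') (hq : Rt T q q') :
    Rt T (p * q) (p' * q') := fun k hk =>
  coeff_mul_agree (fun i hi => hp i (by omega)) (fun i hi => hq i (by omega))

lemma Rt_pow {T : Nat} {p q : Polynomial ℤ} (hp : Rt T p q) (m : Nat) :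
    Rt T (p ^ m) (q ^ m) := by
  induction m with
  | zero => intro k _; rfl
  | succ m ih =>
    rw [pow_succ, pow_succ]
    exact Rt_mul ih hp

-- invariant of B's while loop, by strong induction on n.toNat
lemma loopB_invariant (maxw : Int) (m : Nat) : ∀ (n : Int), n.toNat = m → 0 ≤ n →
    ∀ (r bse : List Int), r.length = (maxw + 1).toNat →
    (poly_power_loop maxw r bse n).length = (maxw + 1).toNat ∧
    ∀ k < (maxw + 1).toNat,
      (poly_power_loop maxw r bse n).getD k 0 = (toP r * (toP bse) ^ n.toNat).coeff k := by
  induction m using Nat.strong_induction_on with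
  | _ m ih =>
    intro n hnm hn r bse hr
    by_cases hpos : 0 < n
    · rw [poly_power_loop, if_pos hpos]
      have h2 : (0:Int) < 2 := by omega
      have hdiv : PySem.Int.floordiv n 2 = n / 2 := PySem.Int.floordiv_eq_ediv_of_pos h2
      have hmod : PySem.Int.mod n 2 = n % 2 := PySem.Int.mod_eq_emod_of_pos h2
      have hrec := ih (PySem.Int.floordiv n 2).toNat (by rw [hdiv]; omega)
        (PySem.Int.floordiv n 2) rfl (by rw [hdiv]; omega)
      by_cases hodd : PySem.Int.mod n 2 = 1
      · rw [if_pos hodd]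
        obtain ⟨hlen', hco'⟩ := hrec (poly_mul_alt r bse maxw) (poly_mul_alt bse bse maxw)
          (mulB_length _ _ _)
        refine ⟨hlen', ?_⟩
        intro k hk
        rw [hco' k hk]
        have hRr : Rt (maxw + 1).toNat (toP (poly_mul_alt r bse maxw)) (toP r * toP bse) :=
          fun k' hk' => by rw [toP_coeff, mulB_getD _ _ _ _ hk']
        have hRb : Rt (maxw + 1).toNat (toP (poly_mul_alt bse bse maxw)) (toP bse * toP bse) :=
          fun k' hk' => by rw [toP_coeff, mulB_getD _ _ _ _ hk']
        rw [Rt_mul hRr (Rt_pow hRb _) k hk]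
        have hexp : 1 + ((PySem.Int.floordiv n 2).toNat + (PySem.Int.floordiv n 2).toNat)
            = n.toNat := by
          rw [hdiv]
          rw [hmod] at hodd
          omega
        rw [show toP r * toP bse * ((toP bse * toP bse) ^ (PySem.Int.floordiv n 2).toNat)
            = toP r * (toP bse) ^ (1 + ((PySem.Int.floordiv n 2).toNat
              + (PySem.Int.floordiv n 2).toNat)) by
          rw [pow_add, pow_add, pow_one]
          ring]
        rw [hexp]
      · rw [if_neg hodd]
        obtain ⟨hlen', hco'⟩ := hrec r (poly_mul_alt bse bse maxw) hr
        refine ⟨hlen', ?_⟩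
        intro k hk
        rw [hco' k hk]
        have hRb : Rt (maxw + 1).toNat (toP (poly_mul_alt bse bse maxw)) (toP bse * toP bse) :=
          fun k' hk' => by rw [toP_coeff, mulB_getD _ _ _ _ hk']
        have hRr : Rt (maxw + 1).toNat (toP r) (toP r) := fun k' _ => rfl
        rw [Rt_mul hRr (Rt_pow hRb _) k hk]
        have hmod01 : PySem.Int.mod n 2 = 0 := by
          rw [hmod] at hodd ⊢
          omega
        have hexp : (PySem.Int.floordiv n 2).toNat + (PySem.Int.floordiv n 2).toNat
            = n.toNat := by
          rw [hdiv]
          rw [hmod] at hmod01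
          omega
        rw [show toP r * ((toP bse * toP bse) ^ (PySem.Int.floordiv n 2).toNat)
            = toP r * (toP bse) ^ ((PySem.Int.floordiv n 2).toNat
              + (PySem.Int.floordiv n 2).toNat) by
          rw [pow_add]
          ring]
        rw [hexp]
    · rw [poly_power_loop, if_neg hpos]
      refine ⟨hr, ?_⟩
      intro k hk
      have : n.toNat = 0 := by omega
      rw [this, pow_zero, mul_one, toP_coeff]

-- the initial series [1] + [0]*maxw denotes the constant polynomial 1
lemma toP_one (maxw : Int) : ∀ i, (toP ([1] ++ List.replicate maxw.toNat 0)).coeff i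
    = (1 : Polynomial ℤ).coeff i := by
  intro i
  rw [toP_coeff, Polynomial.coeff_one]
  cases i with
  | zero => rfl
  | succ i =>
    simp only [List.cons_append, List.nil_append, List.getD_cons_succ]
    rw [if_neg (by omega)]
    simp only [List.getD, List.getElem?_replicate]
    split <;> rfl

-- invariant of A's recursion (n = (m : Int), by strong induction on m)
lemma powA_invariant (a : List Int) (maxw : Int) (hmw : 0 ≤ maxw) (m : Nat) :
    (poly_power a (m : Int) maxw).length = (maxw + 1).toNat ∧
    ∀ k < (maxw + 1).toNat, (poly_power a (m : Int) maxw).getD k 0 = ((toP a) ^ m).coeff k := by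
  induction m using Nat.strong_induction_on with
  | _ m ih =>
    match m with
    | 0 =>
      rw [show ((0 : Nat) : Int) = 0 by rfl]
      unfold poly_power
      rw [if_pos rfl]
      refine ⟨by simp, ?_⟩
      intro k hk
      rw [pow_zero, Polynomial.coeff_one]
      cases k with
      | zero =>
        rw [List.getD_eq_getElem _ _ (by simpa using hk)]
        simp
      | succ k =>
        rw [List.getD_eq_getElem _ _ (by simpa using hk)]
        simp
    | 1 =>
      rw [show ((1 : Nat) : Int) = 1 by rfl]
      unfold poly_power
      rw [if_neg (by omega), if_pos rfl]
      have hcast : maxw + 1 = (((maxw + 1).toNat : Nat) : Int) := by omega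
      rw [hcast, PySem.List.slice_to_natCast]
      have hlen : (a.take (maxw + 1).toNat ++
          List.replicate (max 0 (((maxw + 1).toNat : Int) - a.length)).toNat 0).length
          = (maxw + 1).toNat := by
        simp [List.length_take]
        omega
      refine ⟨hlen, ?_⟩
      intro k hk
      rw [pow_one, toP_coeff]
      by_cases hka : k < a.length
      · rw [List.getD_append _ _ _ _ (by simp [List.length_take]; omega),
          List.getD_eq_getElem _ _ (by simp [List.length_take]; omega),
          List.getElem_take, List.getD_eq_getElem a 0 hka]
      · rw [List.getD_eq_default a 0 (by omega),
          List.getD_append_right _ _ _ _ (by simp [List.length_take]; omega)]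
        simp only [List.getD, List.getElem?_replicate]
        split <;> rfl
    | (m + 2) =>
      have hne0 : ((m + 2 : Nat) : Int) ≠ 0 := by omega
      have hne1 : ((m + 2 : Nat) : Int) ≠ 1 := by omega
      have hnneg : ¬ ((m + 2 : Nat) : Int) < 0 := by omega
      unfold poly_power
      rw [if_neg hne0, if_neg hne1, if_neg hnneg]
      have hmod : PySem.Int.mod ((m + 2 : Nat) : Int) 2 = (((m + 2) % 2 : Nat) : Int) := by
        exact_mod_cast PySem.Int.mod_natCast (m + 2) 2
      have hdiv : PySem.Int.floordiv ((m + 2 : Nat) : Int) 2 = (((m + 2) / 2 : Nat) : Int) := by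
        exact_mod_cast PySem.Int.floordiv_natCast (m + 2) 2
      by_cases hpar : (m + 2) % 2 = 0
      · rw [if_pos (by rw [hmod, hpar]; simp)]
        rw [hdiv]
        have ihh := ih ((m + 2) / 2) (by omega)
        refine ⟨mulA_length _ _ _, ?_⟩
        intro k hk
        rw [mulA_getD _ _ _ _ hk]
        have hsum : (m + 2) / 2 + (m + 2) / 2 = m + 2 := by omega
        rw [show ((toP a) ^ (m + 2)) = (toP a) ^ ((m + 2) / 2) * (toP a) ^ ((m + 2) / 2) by
          rw [← pow_add, hsum]]
        apply coeff_mul_agree <;>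
        · intro i hi
          rw [toP_coeff, ihh.2 i (by omega)]
      · rw [if_neg (by rw [hmod]; intro h; apply hpar; omega)]
        have hsub : ((m + 2 : Nat) : Int) - 1 = ((m + 1 : Nat) : Int) := by omega
        rw [hsub]
        have ihh := ih (m + 1) (by omega)
        refine ⟨mulA_length _ _ _, ?_⟩
        intro k hk
        rw [mulA_getD _ _ _ _ hk, pow_succ]
        apply coeff_mul_agree
        · intro i hi
          rw [toP_coeff, ihh.2 i (by omega)]
        · intro i _
          rfl

-- the degenerate truncation maxw < 0: every multiplication returns the empty list
lemma mulA_nil (a b : List Int) (maxw : Int) (h : maxw < 0) : poly_mul a b maxw = [] := by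
  have hl := mulA_length a b maxw
  rw [show (maxw + 1).toNat = 0 by omega] at hl
  exact List.length_eq_zero_iff.mp hl

lemma mulB_nil (a b : List Int) (maxw : Int) (h : maxw < 0) : poly_mul_alt a b maxw = [] := by
  have hl := mulB_length a b maxw
  rw [show (maxw + 1).toNat = 0 by omega] at hl
  exact List.length_eq_zero_iff.mp hl

lemma powA_nil (a : List Int) (n maxw : Int) (hn : 2 ≤ n) (h : maxw < 0) :
    poly_power a n maxw = [] := by
  unfold poly_power
  rw [if_neg (by omega), if_neg (by omega), if_neg (by omega)]
  split
  · exact mulA_nil _ _ _ h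
  · exact mulA_nil _ _ _ h

lemma loopB_nil (maxw : Int) (h : maxw < 0) (m : Nat) : ∀ (n : Int), n.toNat = m → 1 ≤ n →
    ∀ (r bse : List Int), poly_power_loop maxw r bse n = [] := by
  induction m using Nat.strong_induction_on with
  | _ m ih =>
    intro n hnm hn r bse
    rw [poly_power_loop, if_pos (by omega)]
    have h2 : (0:Int) < 2 := by omega
    have hdiv : PySem.Int.floordiv n 2 = n / 2 := PySem.Int.floordiv_eq_ediv_of_pos h2
    have hmod : PySem.Int.mod n 2 = n % 2 := PySem.Int.mod_eq_emod_of_pos h2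
    by_cases h1 : n = 1
    · have hodd : PySem.Int.mod n 2 = 1 := by rw [hmod, h1]; decide
      rw [if_pos hodd, mulB_nil _ _ _ h, poly_power_loop, if_neg (by rw [hdiv, h1]; omega)]
    · exact ih (PySem.Int.floordiv n 2).toNat (by rw [hdiv]; omega)
        (PySem.Int.floordiv n 2) rfl (by rw [hdiv]; omega) _ _

-- ===== VERDICT (by name: the statement is the Claim_ definition above) =====
theorem poly_power_spec : Claim_equal_poly_power := by
  intro a n maxw _ hpre
  unfold Spec_poly_power
  obtain ⟨hn, hpre2⟩ := hpre
  by_cases hmw : 0 ≤ maxw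
  case neg =>
    -- maxw < 0 and (by Pre_) 2 ≤ n: both sides return []
    have h2n : 2 ≤ n := by omega
    rw [powA_nil a n maxw h2n (by omega)]
    unfold poly_power_alt
    rw [loopB_nil maxw (by omega) n.toNat n rfl (by omega)]
  obtain ⟨m, rfl⟩ : ∃ m : Nat, n = (m : Int) := ⟨n.toNat, by omega⟩
  have hA := powA_invariant a maxw hmw m
  have hr0 : (([1] : List Int) ++ List.replicate maxw.toNat 0).length = (maxw + 1).toNat := by
    simp
    omega
  have hB := loopB_invariant maxw ((m : Int)).toNat (m : Int) rfl (by omega)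
    ([1] ++ List.replicate maxw.toNat 0) a hr0
  have hBn : poly_power_alt a (m : Int) maxw
      = poly_power_loop maxw ([1] ++ List.replicate maxw.toNat 0) a (m : Int) := rfl
  rw [hBn]
  apply List.ext_getElem (by rw [hA.1, hB.1])
  intro k h1 h2
  have hk : k < (maxw + 1).toNat := by rw [← hA.1]; exact h1
  rw [← List.getD_eq_getElem _ 0 h1, ← List.getD_eq_getElem _ 0 h2, hA.2 k hk, hB.2 k hk]
  have h1 : Rt (maxw + 1).toNat (toP ([1] ++ List.replicate maxw.toNat 0) * (toP a) ^ ((m : Int)).toNat)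
      ((1 : Polynomial ℤ) * (toP a) ^ ((m : Int)).toNat) :=
    Rt_mul (fun k' _ => toP_one maxw k') (fun k' _ => rfl)
  rw [h1 k hk, one_mul, Int.toNat_natCast]
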